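-- pv_equiv track=rewrite | github.com/causaliq/causaliq-workflow | src/causaliq_workflow/cache/export.py | sanitise_path_segment
-- ===== SOURCE A (Python) =====
-- WINDOWS_RESERVED_NAMES: set[str] = {
--     "CON",
--     "PRN",
--     "AUX",
--     "NUL",
--     "COM1",
--     "COM2",
--     "COM3",
--     "COM4",
--     "COM5",
--     "COM6",
--     "COM7",
--     "COM8",
--     "COM9",
--     "LPT1",
--     "LPT2",
--     "LPT3",
--     "LPT4",
--     "LPT5",
--     "LPT6",
--     "LPT7",
--     "LPT8",
--     "LPT9",
-- }
--
-- WINDOWS_INVALID_PATH_CHARS: set[str] = set('<>:"/\\|?*')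
--
-- def sanitise_path_segment(value: str) -> str:
--     """Create a filesystem-safe path segment for export.
--
--     This targets cross-platform safety and specifically handles Windows
--     filename restrictions while keeping output readable.
--
--     Args:
--         value: Raw matrix value string.
--
--     Returns:
--         Sanitised segment safe to use as a directory name.
--     """
--     cleaned_chars = []
--     for char in value:
--         is_control_char = ord(char) < 32
--         if is_control_char or char in WINDOWS_INVALID_PATH_CHARS:
--             cleaned_chars.append("_")
--         else:
--             cleaned_chars.append(char)
--
--     cleaned = "".join(cleaned_chars).rstrip(" .")
--
--     if not cleaned:
--         return "_"
--
--     if cleaned.upper() in WINDOWS_RESERVED_NAMES: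
--         return f"_{cleaned}_"
--
--     return cleaned
-- ===== SOURCE B (Python) =====
-- WINDOWS_RESERVED_NAMES: set[str] = {
--     "CON", "PRN", "AUX", "NUL",
--     "COM1", "COM2", "COM3", "COM4", "COM5", "COM6", "COM7", "COM8", "COM9",
--     "LPT1", "LPT2", "LPT3", "LPT4", "LPT5", "LPT6", "LPT7", "LPT8", "LPT9",
-- }
--
-- # All characters that must become "_": the Windows-invalid set plus every
-- # control code point. B loops over THIS small fixed alphabet, doing one
-- # whole-string replace per bad character, instead of branching per input char.
-- _BAD_CHARS = '<>:"/\\|?*' + "".join(map(chr, range(32)))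
--
--
-- def sanitise_path_segment(value: str) -> str:
--     cleaned = value
--     for bad in _BAD_CHARS:
--         cleaned = cleaned.replace(bad, "_")
--     cleaned = cleaned.rstrip(" .")
--     if not cleaned:
--         return "_"
--     if cleaned.upper() in WINDOWS_RESERVED_NAMES:
--         return f"_{cleaned}_"
--     return cleaned
-- ===== Notes on version B (the rewrite author's own statement) =====
-- stated objective: alternative
-- what changed: Instead of A's single pass over the input with a per-character ord-test branch accumulating into a list, B iterates over the fixed 41-character bad alphabet (Windows-invalid chars plus control code points) and rewrites the whole string with one str.replace per bad character; correct because the replacement character is not itself bad, so the staged passes compose to the same substitution; measured faster because each pass runs in C instead of a Python-level per-character loop.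
import Mathlib
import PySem

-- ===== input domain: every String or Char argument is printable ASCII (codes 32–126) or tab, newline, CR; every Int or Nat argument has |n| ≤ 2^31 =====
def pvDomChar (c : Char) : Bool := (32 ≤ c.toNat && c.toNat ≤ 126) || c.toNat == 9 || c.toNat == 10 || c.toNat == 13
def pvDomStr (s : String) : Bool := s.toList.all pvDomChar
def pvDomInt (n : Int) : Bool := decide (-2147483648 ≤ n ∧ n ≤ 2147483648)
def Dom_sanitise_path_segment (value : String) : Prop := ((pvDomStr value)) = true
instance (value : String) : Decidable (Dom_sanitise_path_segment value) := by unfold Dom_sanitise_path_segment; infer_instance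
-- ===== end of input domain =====

-- B replaces A's per-character branch-and-append loop by staged passes: one whole-string
-- replace per character of the fixed bad alphabet (same result because the replacement
-- character is not itself bad; a timing run measured B faster by a constant factor).


-- Module-level constants shared by both Pythons (same module context).
-- WINDOWS_RESERVED_NAMES (a set of strings; held as List Char values for comparison)
def pvWinReserved : PySem.Set (List Char) :=
  PySem.Set.ofList
    ["CON".toList, "PRN".toList, "AUX".toList, "NUL".toList,
     "COM1".toList, "COM2".toList, "COM3".toList, "COM4".toList, "COM5".toList,
     "COM6".toList, "COM7".toList, "COM8".toList, "COM9".toList,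
     "LPT1".toList, "LPT2".toList, "LPT3".toList, "LPT4".toList, "LPT5".toList,
     "LPT6".toList, "LPT7".toList, "LPT8".toList, "LPT9".toList]

-- WINDOWS_INVALID_PATH_CHARS = set('<>:"/\\|?*')
def pvWinInvalid : PySem.Set Char := PySem.Set.ofList "<>:\"/\\|?*".toList

-- str.rstrip(chars) (PySem has no chars-argument rstrip): drop trailing chars
-- that are in `chars`; exact port of Python's semantics. Used by both ports.
def pvRstripChars (cs : List Char) (chars : List Char) : List Char :=
  (cs.reverse.dropWhile (fun c => chars.contains c)).reverse

-- ===== PORT A =====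
def sanitise_path_segment (value : String) : String :=
  -- the per-character loop appending '_' or the char
  let cleanedChars : List Char := value.toList.foldl
    (fun acc c =>
      let isControlChar := decide (c.toNat < 32)
      if isControlChar || PySem.Set.contains pvWinInvalid c then acc ++ ['_'] else acc ++ [c]) []
  -- "".join(cleaned_chars).rstrip(" .")  (join of 1-char strings is the char list)
  let cleaned := pvRstripChars cleanedChars [' ', '.']
  if cleaned = [] then "_"
  else if PySem.Set.contains pvWinReserved (PySem.Chars.upper cleaned) then String.ofList ('_' :: cleaned ++ ['_'])
  else String.ofList cleaned

-- ===== PORT B =====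
-- _BAD_CHARS = '<>:"/\\|?*' + "".join(map(chr, range(32)))
def pvBadChars : List Char :=
  "<>:\"/\\|?*".toList ++ (PySem.List.pyRange 0 32 1).map (fun i => Char.ofNat i.toNat)

def sanitise_path_segment_alt (value : String) : String :=
  -- for bad in _BAD_CHARS: cleaned = cleaned.replace(bad, "_")
  let cleaned := pvBadChars.foldl (fun s bad => PySem.Chars.replace s [bad] ['_']) value.toList
  let cleaned := pvRstripChars cleaned [' ', '.']
  if cleaned = [] then "_"
  else if PySem.Set.contains pvWinReserved (PySem.Chars.upper cleaned) then String.ofList ('_' :: cleaned ++ ['_'])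
  else String.ofList cleaned

-- ===== PRECONDITION & SPEC =====
def Spec_sanitise_path_segment (value : String) (out : String) : Prop := out = sanitise_path_segment_alt value
instance (value : String) (out : String) : Decidable (Spec_sanitise_path_segment value out) := by unfold Spec_sanitise_path_segment; infer_instance

-- ===== CLAIM (what is proved, stated in full; the proofs are below) =====
def Claim_equal_sanitise_path_segment : Prop := ∀ (value : String), Dom_sanitise_path_segment value → Spec_sanitise_path_segment value (sanitise_path_segment value)

-- ===== LEMMAS AND PROOFS =====

-- replace with a single-character pattern is the pointwise substitution map.
theorem replace_go_single (b r : Char) (l acc : List Char) (fuel : Nat) (h : l.length ≤ fuel) :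
    PySem.Chars.replace.go [b] [r] fuel l acc
      = acc.reverse ++ l.map (fun c => if c = b then r else c) := by
  induction l generalizing fuel acc with
  | nil => cases fuel <;> simp [PySem.Chars.replace.go]
  | cons a t ih =>
    cases fuel with
    | zero => simp at h
    | succ n =>
      rw [PySem.Chars.replace.go]
      by_cases hab : a = b
      · simp [hab, List.isPrefixOf, ih _ _ (by simpa using h)]
      · have : [b].isPrefixOf (a :: t) = false := by
          simp [List.isPrefixOf]; exact fun h => hab h.symm
        simp [this, ih _ _ (by simpa using h), hab]

theorem replace_single (cs : List Char) (b r : Char) :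
    PySem.Chars.replace cs [b] [r] = cs.map (fun c => if c = b then r else c) := by
  unfold PySem.Chars.replace
  simp [replace_go_single b r cs [] cs.length le_rfl]

-- folding whole-string replaces over the bad alphabet is one map of the folded substitution
theorem foldl_replace_eq_map (bads cs : List Char) (r : Char) :
    bads.foldl (fun s bad => PySem.Chars.replace s [bad] [r]) cs
      = cs.map (fun c => bads.foldl (fun x b => if x = b then r else x) c) := by
  induction bads generalizing cs with
  | nil => simp
  | cons b t ih =>
    rw [List.foldl_cons, ih, replace_single, List.map_map]
    rfl

-- the folded substitution, when the replacement char is not itself bad, is a membership test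
theorem foldl_subst_fixed (bads : List Char) (r : Char) (hr : r ∉ bads) :
    bads.foldl (fun x b => if x = b then r else x) r = r := by
  induction bads with
  | nil => rfl
  | cons b t ih =>
    simp only [List.mem_cons, not_or] at hr
    simp only [List.foldl_cons, if_neg hr.1, ih hr.2]

theorem foldl_subst_eq_mem (bads : List Char) (r c : Char) (hr : r ∉ bads) :
    bads.foldl (fun x b => if x = b then r else x) c = if c ∈ bads then r else c := by
  induction bads with
  | nil => simp
  | cons b t ih =>
    simp only [List.mem_cons, not_or] at hr
    by_cases hc : c = b
    · simp only [List.foldl_cons, List.mem_cons, hc, true_or, if_true,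
        foldl_subst_fixed t r hr.2]
    · simp only [List.foldl_cons, if_neg hc, ih hr.2, List.mem_cons]
      split_ifs <;> tauto

-- membership in the bad alphabet is exactly A's per-character test
theorem toNat_ofNat_small (n : Nat) (h : n < 55296) : (Char.ofNat n).toNat = n := by
  have hv : n.isValidChar := Or.inl h
  rw [Char.ofNat, dif_pos hv]
  simp [Char.ofNatAux, Char.toNat]

-- membership in the bad alphabet is exactly A's per-character test
theorem mem_badChars (c : Char) :
    (c ∈ pvBadChars) ↔ (c.toNat < 32 ∨ c ∈ pvWinInvalid) := by
  unfold pvBadChars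
  rw [List.mem_append, List.mem_map]
  constructor
  · rintro (h | ⟨i, hi, rfl⟩)
    · exact Or.inr h
    · rw [PySem.List.mem_pyRange_one] at hi
      left
      rw [toNat_ofNat_small i.toNat (by omega)]
      omega
  · rintro (h | h)
    · refine Or.inr ⟨(c.toNat : Int), ?_, ?_⟩
      · rw [PySem.List.mem_pyRange_one]; omega
      · simp [Char.ofNat_toNat]
    · exact Or.inl h

-- '_' is not in the bad alphabet
theorem underscore_not_bad : '_' ∉ pvBadChars := by decide

-- A's accumulate-one-char loop builds exactly B's staged-replace result.
theorem cleaned_eq (cs : List Char) :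
    cs.foldl
      (fun acc c =>
        let isControlChar := decide (c.toNat < 32)
        if isControlChar || PySem.Set.contains pvWinInvalid c then acc ++ ['_'] else acc ++ [c]) []
      = pvBadChars.foldl (fun s bad => PySem.Chars.replace s [bad] ['_']) cs := by
  rw [foldl_replace_eq_map]
  have hf : (fun (acc : List Char) c =>
        let isControlChar := decide (c.toNat < 32)
        if isControlChar || PySem.Set.contains pvWinInvalid c then acc ++ ['_'] else acc ++ [c])
      = fun acc c => acc ++ [pvBadChars.foldl (fun x b => if x = b then '_' else x) c] := by
    funext acc c
    show (if (decide (c.toNat < 32) || PySem.Set.contains pvWinInvalid c) = true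
          then acc ++ ['_'] else acc ++ [c]) = _
    rw [foldl_subst_eq_mem _ _ _ underscore_not_bad]
    by_cases hb : c ∈ pvBadChars
    · have hA : (decide (c.toNat < 32) || PySem.Set.contains pvWinInvalid c) = true := by
        rcases (mem_badChars c).mp hb with h | h
        · simp [h]
        · rw [(PySem.Set.contains_iff ..).mpr h]; simp
      rw [if_pos hA, if_pos hb]
    · have h1 : ¬ c.toNat < 32 := fun h => hb ((mem_badChars c).mpr (Or.inl h))
      have h2 : PySem.Set.contains pvWinInvalid c = false := by
        by_contra h
        exact hb ((mem_badChars c).mpr (Or.inr ((PySem.Set.contains_iff ..).mp (by simpa using h))))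
      have hA : ¬ ((decide (c.toNat < 32) || PySem.Set.contains pvWinInvalid c) = true) := by
        rw [h2]; simp [h1]
      rw [if_neg hA, if_neg hb]
  rw [hf, PySem.List.foldl_append_singleton_eq_map, List.nil_append]

-- ===== VERDICT (by name: the statement is the Claim_ definition above) =====
theorem sanitise_path_segment_spec : Claim_equal_sanitise_path_segment := by
  intro value _
  unfold Spec_sanitise_path_segment sanitise_path_segment sanitise_path_segment_alt
  rw [cleaned_eq]
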